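-- pv_equiv track=rewrite | github.com/mateozorzi/TDA | EjRepaso/pd/juanVago.py | reconstruirSolucion
-- ===== SOURCE A (Python) =====
-- def reconstruirSolucion(trabajos, optimos, n, trabajos_realizados):
--     if n <= 0:
--         return trabajos_realizados
--
--     if optimos[n-1] > optimos[n-2]: #trabaje el dia n
--         trabajos_realizados.append(n-2)
--         return reconstruirSolucion(trabajos, optimos, n-2, trabajos_realizados)
--     else:
--         #trabaje el dia n-1
--         return reconstruirSolucion(trabajos, optimos, n-1, trabajos_realizados)
-- ===== SOURCE B (Python) =====
-- def _elegidos(optimos, n):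
--     # pure helper: the list of chosen job indices for subproblem size n
--     if n <= 0:
--         return []
--     if optimos[n-1] > optimos[n-2]:
--         return [n-2] + _elegidos(optimos, n-2)
--     return _elegidos(optimos, n-1)
--
-- def reconstruirSolucion(trabajos, optimos, n, trabajos_realizados):
--     trabajos_realizados += _elegidos(optimos, n)
--     return trabajos_realizados
-- ===== Notes on version B (the rewrite author's own statement) =====
-- stated objective: simpler
-- what changed: Replaces A's accumulator-threading tail recursion with a pure helper that builds the chosen-index list by consing (no accumulator, no unused parameters), extended onto trabajos_realizados once at the end.
import Mathlib
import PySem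

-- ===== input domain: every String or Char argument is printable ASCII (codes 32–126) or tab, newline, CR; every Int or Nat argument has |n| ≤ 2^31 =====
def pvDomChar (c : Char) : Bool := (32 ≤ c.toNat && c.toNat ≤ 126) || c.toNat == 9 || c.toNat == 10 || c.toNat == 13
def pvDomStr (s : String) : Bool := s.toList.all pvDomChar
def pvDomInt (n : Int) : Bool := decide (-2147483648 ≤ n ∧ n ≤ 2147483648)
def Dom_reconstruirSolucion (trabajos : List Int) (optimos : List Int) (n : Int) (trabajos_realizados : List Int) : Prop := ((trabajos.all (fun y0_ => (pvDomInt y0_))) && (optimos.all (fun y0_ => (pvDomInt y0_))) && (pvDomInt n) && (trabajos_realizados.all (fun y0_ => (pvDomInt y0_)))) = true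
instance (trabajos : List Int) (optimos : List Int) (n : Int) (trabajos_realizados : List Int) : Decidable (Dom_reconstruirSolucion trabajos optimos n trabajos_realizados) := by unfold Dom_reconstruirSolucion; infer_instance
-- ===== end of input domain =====

-- B replaces A's accumulator-threading tail recursion by a pure cons-building helper,
-- extended onto trabajos_realizados once at the end (same net in-place mutation as A).
-- ===== PORT A =====
def reconstruirSolucion (trabajos : List Int) (optimos : List Int) (n : Int) (trabajos_realizados : List Int) : List Int :=
  if n ≤ 0 then trabajos_realizados
  else
    match PySem.List.pyGet? optimos (n-1), PySem.List.pyGet? optimos (n-2) with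
    | some a, some b =>
      if a > b then
        reconstruirSolucion trabajos optimos (n-2) (trabajos_realizados ++ [n-2])
      else
        reconstruirSolucion trabajos optimos (n-1) trabajos_realizados
    | _, _ => trabajos_realizados   -- IndexError in Python; excluded by Pre_
termination_by n.toNat
decreasing_by all_goals omega

-- ===== PORT B =====
def elegidosB (optimos : List Int) (n : Int) : List Int :=
  if n ≤ 0 then []
  else
    match PySem.List.pyGet? optimos (n-1) with
    | none => []   -- IndexError in Python; excluded by Pre_
    | some a =>
      match PySem.List.pyGet? optimos (n-2) with
      | none => []   -- IndexError in Python; excluded by Pre_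
      | some b =>
        if a > b then (n-2) :: elegidosB optimos (n-2)
        else elegidosB optimos (n-1)
termination_by n.toNat
decreasing_by all_goals omega

def reconstruirSolucion_alt (trabajos : List Int) (optimos : List Int) (n : Int) (trabajos_realizados : List Int) : List Int :=
  trabajos_realizados ++ elegidosB optimos n

-- ===== PRECONDITION & SPEC =====
-- Pre_ excludes exactly the inputs on which Python A raises IndexError (n larger than
-- len(optimos)); nothing else is excluded.
def Pre_reconstruirSolucion (trabajos : List Int) (optimos : List Int) (n : Int) (trabajos_realizados : List Int) : Prop :=
  n ≤ (optimos.length : Int)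
instance (trabajos : List Int) (optimos : List Int) (n : Int) (trabajos_realizados : List Int) : Decidable (Pre_reconstruirSolucion trabajos optimos n trabajos_realizados) := by unfold Pre_reconstruirSolucion; infer_instance
def pvWitness_reconstruirSolucion : List Int × List Int × Int × List Int := ([3, 5], [3, 5, 8], 3, [])

def Spec_reconstruirSolucion (trabajos : List Int) (optimos : List Int) (n : Int) (trabajos_realizados : List Int) (out : List Int) : Prop := out = reconstruirSolucion_alt trabajos optimos n trabajos_realizados
instance (trabajos : List Int) (optimos : List Int) (n : Int) (trabajos_realizados : List Int) (out : List Int) : Decidable (Spec_reconstruirSolucion trabajos optimos n trabajos_realizados out) := by unfold Spec_reconstruirSolucion; infer_instance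

-- ===== CLAIM (what is proved, stated in full; the proofs are below) =====
def Claim_equal_reconstruirSolucion : Prop := ∀ (trabajos : List Int) (optimos : List Int) (n : Int) (trabajos_realizados : List Int), Dom_reconstruirSolucion trabajos optimos n trabajos_realizados → Pre_reconstruirSolucion trabajos optimos n trabajos_realizados → Spec_reconstruirSolucion trabajos optimos n trabajos_realizados (reconstruirSolucion trabajos optimos n trabajos_realizados)

-- ===== LEMMAS AND PROOFS =====
-- A's accumulator recursion equals the accumulator appended with B's pure list,
-- unconditionally (both ports bail out identically on the out-of-range fallback).
theorem reconstruirSolucion_eq_append (trabajos optimos : List Int) (n : Int)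
    (tr : List Int) :
    reconstruirSolucion trabajos optimos n tr = tr ++ elegidosB optimos n := by
  fun_induction reconstruirSolucion trabajos optimos n tr with
  | case1 => rw [elegidosB]; simp_all
  | case2 => rw [elegidosB]; simp_all
  | case3 => rw [elegidosB]; simp_all; split_ifs <;> first | rfl | omega
  | case4 n tr h hx =>
    have he : elegidosB optimos n = [] := by
      rw [elegidosB, if_neg (by omega)]
      cases h1 : PySem.List.pyGet? optimos (n-1) with
      | none => rfl
      | some a =>
        cases h2 : PySem.List.pyGet? optimos (n-2) with
        | none => rfl
        | some b => exact absurd h2 (hx a b h1)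
    simp [he]

-- ===== VERDICT (by name: the statement is the Claim_ definition above) =====
theorem reconstruirSolucion_spec : Claim_equal_reconstruirSolucion := by
  intro trabajos optimos n trabajos_realizados _ _
  unfold Spec_reconstruirSolucion reconstruirSolucion_alt
  exact reconstruirSolucion_eq_append trabajos optimos n trabajos_realizados
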